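-- pv_equiv track=rewrite | github.com/qhungbui7/not-neural-nets | frequent-itemset-mining/fim_apriori.py | Find_Itemset_Cover
-- ===== SOURCE A (Python) =====
-- def Find_Itemset_Cover(X, list_transactions):
--     """
--     Function find the set of transaction containing X.
--
--     * Parameter:
--     X -- a 1D python list, indicate an itemset. For example ['milk', 'coffee', ...]
--     list_transactions - a 2D python list, indicate the list of transactions
--
--     * Return:
--     list_transaction_cover -- a python list, indicate the list of transaction_id containing X.
--                                 For example: [1, 2, 100, ...]
--     """
--     list_transaction_cover = None
--
--
--     list_transaction_cover = []
--     for index, trans in enumerate(list_transactions):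
--         in_set = True
--         for item in X:
--             if item not in trans:
--                 in_set = False
--                 break
--         if in_set:
--             list_transaction_cover.append(index)
--
--
--     return list_transaction_cover
-- ===== SOURCE B (Python) =====
-- def Find_Itemset_Cover(X, list_transactions):
--     # Candidate-refinement: start from all transaction indices and, for each
--     # item of X, keep only the indices whose transaction contains that item.
--     cover = list(range(len(list_transactions)))
--     for item in X:
--         cover = [i for i in cover if item in list_transactions[i]]
--     return cover
-- ===== Notes on version B (the rewrite author's own statement) =====
-- stated objective: alternative
-- what changed: Instead of scanning each transaction and testing all items of X with a flag/break, B starts from the full index list and refines it once per item of X, filtering out indices whose transaction lacks that item; no per-transaction inner loop over X with a flag remains.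
import Mathlib
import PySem

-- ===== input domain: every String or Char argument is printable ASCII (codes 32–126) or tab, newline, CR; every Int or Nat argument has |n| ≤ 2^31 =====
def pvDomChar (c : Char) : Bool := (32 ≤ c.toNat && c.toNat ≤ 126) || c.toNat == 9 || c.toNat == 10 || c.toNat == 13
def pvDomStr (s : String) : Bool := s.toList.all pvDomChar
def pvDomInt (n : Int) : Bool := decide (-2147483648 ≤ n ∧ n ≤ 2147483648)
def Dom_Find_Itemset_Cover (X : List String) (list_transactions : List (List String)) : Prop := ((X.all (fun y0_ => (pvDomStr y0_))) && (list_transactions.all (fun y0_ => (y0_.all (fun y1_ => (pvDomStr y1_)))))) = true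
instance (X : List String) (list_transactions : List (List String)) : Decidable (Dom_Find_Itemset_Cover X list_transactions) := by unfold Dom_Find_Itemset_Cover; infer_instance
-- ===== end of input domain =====

-- B refines the full index list once per item of X instead of A's per-transaction
-- inner loop over X with a flag and break; same cost, different decomposition.

-- ===== PORT A =====
-- A's inner 'for item in X: if item not in trans: in_set = False; break' loop.
def pvAInSet : List String → List String → Bool
  | [], _ => true
  | item :: rest, tr => if !(tr.contains item) then false else pvAInSet rest tr

def Find_Itemset_Cover (X : List String) (list_transactions : List (List String)) : List Int :=
  (PySem.List.enumerate list_transactions 0).foldl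
    (fun acc p => if pvAInSet X p.2 then acc ++ [p.1] else acc) []

-- ===== PORT B =====
def Find_Itemset_Cover_alt (X : List String) (list_transactions : List (List String)) : List Int :=
  X.foldl
    (fun cover item =>
      cover.filter (fun i =>
        match PySem.List.pyGet? list_transactions i with
        | some t => t.contains item
        | none => false))
    (PySem.List.pyRange 0 (list_transactions.length : Int) 1)

-- ===== PRECONDITION & SPEC =====
def Spec_Find_Itemset_Cover (X : List String) (list_transactions : List (List String)) (out : List Int) : Prop := out = Find_Itemset_Cover_alt X list_transactions
instance (X : List String) (list_transactions : List (List String)) (out : List Int) : Decidable (Spec_Find_Itemset_Cover X list_transactions out) := by unfold Spec_Find_Itemset_Cover; infer_instance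

-- ===== CLAIM (what is proved, stated in full; the proofs are below) =====
def Claim_equal_Find_Itemset_Cover : Prop := ∀ (X : List String) (list_transactions : List (List String)), Dom_Find_Itemset_Cover X list_transactions → Spec_Find_Itemset_Cover X list_transactions (Find_Itemset_Cover X list_transactions)

-- ===== LEMMAS AND PROOFS =====

-- A's flagged inner loop is the conjunction over X.
lemma pvAInSet_eq_all (X t : List String) :
    pvAInSet X t = X.all (fun item => t.contains item) := by
  induction X with
  | nil => rfl
  | cons x rest ih =>
    simp only [pvAInSet, List.all_cons, ih]
    cases t.contains x <;> simp

-- B's refinement loop is one filter by the conjunction over X.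
lemma pvB_char (q : String → Int → Bool) (X : List String) :
    ∀ l : List Int,
      X.foldl (fun cover item => cover.filter (q item)) l
        = l.filter (fun i => X.all (fun item => q item i)) := by
  induction X with
  | nil => intro l; simp
  | cons x rest ih =>
    intro l
    simp only [List.foldl_cons, ih, List.filter_filter, List.all_cons]
    exact List.filter_congr (fun i _ => by rw [Bool.and_comm])

-- pointwise-on-members congruence for List.all
lemma pv_all_congr_mem {α : Type} (l : List α) (p q : α → Bool)
    (h : ∀ a ∈ l, p a = q a) : l.all p = l.all q := by
  induction l with
  | nil => rfl
  | cons x rest ih =>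
    simp only [List.all_cons, h x (List.mem_cons_self), ih (fun a ha => h a (List.mem_cons_of_mem _ ha))]

lemma pvA_char (X : List String) (ts : List (List String)) :
    Find_Itemset_Cover X ts
      = (PySem.List.pyRange 0 (ts.length : Int) 1).filter
          (fun j => X.all (fun item => (PySem.List.pyGetD ts j []).contains item)) := by
  unfold Find_Itemset_Cover
  rw [PySem.List.enumerate_eq_map_pyRange ts ([] : List String),
      PySem.List.foldl_append_if (fun p : Int × List String => pvAInSet X p.2) (·.1)]
  rw [List.filter_map, List.map_map]
  simp [Function.comp_def, pvAInSet_eq_all]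

theorem pv_main (X : List String) (ts : List (List String)) :
    Find_Itemset_Cover X ts = Find_Itemset_Cover_alt X ts := by
  unfold Find_Itemset_Cover_alt
  rw [pvB_char, pvA_char]
  refine List.filter_congr (fun i hi => ?_)
  rw [PySem.List.mem_pyRange_one] at hi
  refine pv_all_congr_mem X _ _ (fun item _ => ?_)
  simp only [PySem.List.pyGet?_eq_some_getElem ts hi.1 (by simpa using hi.2),
      PySem.List.pyGetD_eq_getElem ts [] hi.1 (by simpa using hi.2)]

-- ===== VERDICT (by name: the statement is the Claim_ definition above) =====
theorem Find_Itemset_Cover_spec : Claim_equal_Find_Itemset_Cover := by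
  intro X ts _
  unfold Spec_Find_Itemset_Cover
  exact pv_main X ts
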